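-- pv_equiv track=rewrite | github.com/eous/pcode | pcode/chat.py | _pick_nearest
-- ===== SOURCE A (Python) =====
-- def _pick_nearest(content: str, old_string: str, near_line: int) -> int:
--     """Return the char index of the occurrence of old_string nearest to near_line."""
--     line_starts = [0]
--     for i, ch in enumerate(content):
--         if ch == "\n":
--             line_starts.append(i + 1)
--
--     best_idx = -1
--     best_dist = float("inf")
--     start = 0
--     while True:
--         idx = content.find(old_string, start)
--         if idx == -1:
--             break
--         # Find line number for this occurrence
--         lo, hi = 0, len(line_starts) - 1
--         while lo < hi:
--             mid = (lo + hi + 1) // 2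
--             if line_starts[mid] <= idx:
--                 lo = mid
--             else:
--                 hi = mid - 1
--         line_num = lo + 1
--         dist = abs(line_num - near_line)
--         if dist < best_dist:
--             best_dist = dist
--             best_idx = idx
--         start = idx + 1
--     return best_idx
-- ===== SOURCE B (Python) =====
-- def _pick_nearest(content: str, old_string: str, near_line: int) -> int:
--     """Return the char index of the occurrence of old_string nearest to near_line."""
--     best_idx = -1
--     best_dist = None
--     start = 0
--     while True:
--         idx = content.find(old_string, start)
--         if idx == -1:
--             return best_idx
--         line_num = content[:idx].count("\n") + 1
--         dist = abs(line_num - near_line)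
--         if best_dist is None or dist < best_dist:
--             best_dist = dist
--             best_idx = idx
--         start = idx + 1
-- ===== Notes on version B (the rewrite author's own statement) =====
-- stated objective: simpler
-- what changed: Drops the line_starts prefix index (built by a Python-level scan of every character) and the hand-written binary search; each occurrence's line number is computed directly by counting newlines in the prefix before it.
import Mathlib
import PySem

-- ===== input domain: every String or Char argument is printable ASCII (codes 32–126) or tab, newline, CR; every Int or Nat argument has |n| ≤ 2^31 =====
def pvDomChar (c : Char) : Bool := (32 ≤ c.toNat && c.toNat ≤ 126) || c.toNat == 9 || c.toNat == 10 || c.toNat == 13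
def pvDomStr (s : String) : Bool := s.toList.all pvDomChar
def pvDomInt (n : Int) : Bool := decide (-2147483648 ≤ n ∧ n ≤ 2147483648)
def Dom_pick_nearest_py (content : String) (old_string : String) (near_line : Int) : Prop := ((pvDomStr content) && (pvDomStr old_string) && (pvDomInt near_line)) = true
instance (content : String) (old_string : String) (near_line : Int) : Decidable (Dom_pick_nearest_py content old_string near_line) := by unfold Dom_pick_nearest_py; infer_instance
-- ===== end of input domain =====

-- B drops A's line_starts prefix index and hand-written binary search: each occurrence's
-- line number is obtained directly by counting newlines in the prefix before it (objective: simpler).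

-- ===== PORT A =====
-- Python's `best_dist = float("inf")` is modeled as `none : Option Int`
-- (every real distance compares < inf, i.e. < none).
def pvLtInf (d : Int) (best : Option Int) : Bool :=
  match best with
  | none => true
  | some b => decide (d < b)

-- line_starts = [0]; for i, ch in enumerate(content): if ch == "\n": line_starts.append(i + 1)
def pvLineStarts (cs : List Char) : List Int :=
  List.foldl (fun acc p => if p.2 == '\n' then acc ++ [p.1 + 1] else acc) [0]
    (PySem.List.enumerate cs 0)

-- lo, hi = 0, len(line_starts)-1; while lo < hi: ...  (line_starts[mid] is always in range,
-- and lo, hi, mid stay nonnegative, so Nat indices and Nat division match Python exactly)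
def pvBS (ls : List Int) (idx : Int) (lo hi : Nat) : Nat :=
  if _h : lo < hi then
    let mid := (lo + hi + 1) / 2
    if ls.getD mid 0 ≤ idx then pvBS ls idx mid hi else pvBS ls idx lo (mid - 1)
  else lo
  termination_by hi - lo
  decreasing_by all_goals omega

-- the `while True` find-loop; fuel ≥ number of iterations (start strictly increases and the
-- loop stops once start exceeds len(content)), so the fuel-0 case is never reached
def pvLoopA (cs os : List Char) (near_line : Int) (ls : List Int) :
    Nat → Int → Int → Option Int → Int
  | 0, _, best_idx, _ => best_idx
  | fuel + 1, start, best_idx, best_dist =>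
    let idx := PySem.Chars.findFrom cs os start
    if idx = -1 then best_idx
    else
      let line_num : Int := (pvBS ls idx 0 (ls.length - 1) : Int) + 1
      let dist := |line_num - near_line|
      if pvLtInf dist best_dist then pvLoopA cs os near_line ls fuel (idx + 1) idx (some dist)
      else pvLoopA cs os near_line ls fuel (idx + 1) best_idx best_dist

def pick_nearest_py (content : String) (old_string : String) (near_line : Int) : Int :=
  let cs := content.toList
  pvLoopA cs old_string.toList near_line (pvLineStarts cs) (cs.length + 2) 0 (-1) none

-- ===== PORT B =====
-- `best_dist = None` start; `content[:idx].count("\n")` counts a single character, which is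
-- exactly List.count on the prefix.
def pvLoopB (cs os : List Char) (near_line : Int) :
    Nat → Int → Int → Option Int → Int
  | 0, _, best_idx, _ => best_idx
  | fuel + 1, start, best_idx, best_dist =>
    let idx := PySem.Chars.findFrom cs os start
    if idx = -1 then best_idx
    else
      let line_num : Int := ((cs.take idx.toNat).count '\n' : Int) + 1
      let dist := |line_num - near_line|
      if best_dist.elim true (fun b => decide (dist < b)) then
        pvLoopB cs os near_line fuel (idx + 1) idx (some dist)
      else pvLoopB cs os near_line fuel (idx + 1) best_idx best_dist

def pick_nearest_py_alt (content : String) (old_string : String) (near_line : Int) : Int :=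
  pvLoopB content.toList old_string.toList near_line (content.toList.length + 2) 0 (-1) none

-- ===== PRECONDITION & SPEC =====
def Spec_pick_nearest_py (content : String) (old_string : String) (near_line : Int) (out : Int) : Prop := out = pick_nearest_py_alt content old_string near_line
instance (content : String) (old_string : String) (near_line : Int) (out : Int) : Decidable (Spec_pick_nearest_py content old_string near_line out) := by unfold Spec_pick_nearest_py; infer_instance

-- ===== CLAIM (what is proved, stated in full; the proofs are below) =====
def Claim_equal_pick_nearest_py : Prop := ∀ (content : String) (old_string : String) (near_line : Int), Dom_pick_nearest_py content old_string near_line → Spec_pick_nearest_py content old_string near_line (pick_nearest_py content old_string near_line)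

-- ===== LEMMAS AND PROOFS =====

-- recursive description of line_starts' tail: the positions just after each '\n', offset by `off`
def pvF (off : Int) : List Char → List Int
  | [] => []
  | c :: t => if c = '\n' then (off + 1) :: pvF (off + 1) t else pvF (off + 1) t

lemma pvFoldl_enum (cs : List Char) : ∀ (off : Int) (acc : List Int),
    List.foldl (fun acc p => if p.2 == '\n' then acc ++ [p.1 + 1] else acc) acc
      (PySem.List.enumerate cs off) = acc ++ pvF off cs := by
  induction cs with
  | nil => intro off acc; simp [PySem.List.enumerate, pvF]
  | cons c t ih =>
    intro off acc
    rw [show PySem.List.enumerate (c :: t) off = (off, c) :: PySem.List.enumerate t (off + 1)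
        from rfl,
      List.foldl_cons, ih]
    by_cases hc : c = '\n' <;> simp [pvF, hc]

lemma pvLineStarts_eq (cs : List Char) : pvLineStarts cs = 0 :: pvF 0 cs := by
  unfold pvLineStarts
  rw [pvFoldl_enum cs 0 [0]]
  rfl

lemma pvF_length (cs : List Char) : ∀ off : Int, (pvF off cs).length = cs.count '\n' := by
  induction cs with
  | nil => intro off; simp [pvF]
  | cons c t ih =>
    intro off
    by_cases hc : c = '\n' <;> simp [pvF, hc, ih]

lemma pvF_pos (cs : List Char) : ∀ (off : Int) (x : Int), x ∈ pvF off cs → off < x := by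
  induction cs with
  | nil => intro off x hx; simp [pvF] at hx
  | cons c t ih =>
    intro off x hx
    by_cases hc : c = '\n'
    · simp [pvF, hc] at hx
      rcases hx with h | h
      · omega
      · have := ih (off + 1) x h; omega
    · simp [pvF, hc] at hx
      have := ih (off + 1) x hx; omega

lemma pvF_getD (cs : List Char) : ∀ (off : Int) (k j : Nat), k < (pvF off cs).length →
    ((pvF off cs).getD k 0 ≤ off + (j : Int) ↔ k < (cs.take j).count '\n') := by
  induction cs with
  | nil => intro off k j hk; simp [pvF] at hk
  | cons c t ih =>
    intro off k j hk
    cases j with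
    | zero =>
      simp only [List.take_zero, List.count_nil]
      constructor
      · intro hle
        exfalso
        have hmem : (pvF off (c :: t)).getD k 0 ∈ pvF off (c :: t) := by
          rw [List.getD_eq_getElem _ _ hk]; exact List.getElem_mem _
        have := pvF_pos (c :: t) off _ hmem
        omega
      · intro h; omega
    | succ j' =>
      have hcast : off + ((j' + 1 : Nat) : Int) = (off + 1) + (j' : Int) := by push_cast; ring
      by_cases hc : c = '\n'
      · simp only [pvF, if_pos hc] at hk ⊢
        cases k with
        | zero =>
          simp only [List.getD_cons_zero, List.take_succ_cons, List.count_cons, hc]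
          rw [show (if (('\n' : Char) == '\n') = true then 1 else 0) = 1 from rfl]
          constructor
          · intro _; omega
          · intro _; push_cast; omega
        | succ k' =>
          simp only [List.getD_cons_succ, List.length_cons, List.take_succ_cons,
            List.count_cons, hc] at hk ⊢
          rw [show (if (('\n' : Char) == '\n') = true then 1 else 0) = 1 from rfl, hcast,
            ih (off + 1) k' j' (by omega)]
          omega
      · simp only [pvF, if_neg hc] at hk ⊢
        rw [List.take_succ_cons, List.count_cons, if_neg (by simp [hc]), hcast,
          ih (off + 1) k j' hk]
        omega

-- the binary search returns n whenever lo ≤ n ≤ hi < len and "ls[k] ≤ idx ↔ k ≤ n" for all k < len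
lemma pvBS_eq (ls : List Int) (idx : Int) (n : Nat)
    (hL : ∀ k, k < ls.length → (ls.getD k 0 ≤ idx ↔ k ≤ n)) :
    ∀ d lo hi, hi - lo = d → lo ≤ n → n ≤ hi → hi < ls.length → pvBS ls idx lo hi = n := by
  intro d
  induction d using Nat.strong_induction_on with
  | _ d ihd =>
    intro lo hi hd h1 h2 h3
    rw [pvBS]
    split
    · next hlt =>
      have hmidlo : lo < (lo + hi + 1) / 2 := by omega
      have hmidhi : (lo + hi + 1) / 2 ≤ hi := by omega
      by_cases hc : ls.getD ((lo + hi + 1) / 2) 0 ≤ idx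
      · rw [if_pos hc]
        have hmn : (lo + hi + 1) / 2 ≤ n := (hL _ (by omega)).mp hc
        exact ihd (hi - (lo + hi + 1) / 2) (by omega) _ _ rfl hmn h2 h3
      · rw [if_neg hc]
        have hmn : ¬ ((lo + hi + 1) / 2 ≤ n) := fun h => hc ((hL _ (by omega)).mpr h)
        exact ihd ((lo + hi + 1) / 2 - 1 - lo) (by omega) _ _ rfl h1 (by omega) (by omega)
    · next hlt => omega

lemma count_take_le (cs : List Char) (j : Nat) : (cs.take j).count '\n' ≤ cs.count '\n' :=
  (List.take_sublist j cs).count_le _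

-- A's binary-search line number equals B's prefix newline count, for any occurrence index 0 ≤ idx
lemma line_eq (cs : List Char) (idx : Int) (h0 : 0 ≤ idx) :
    pvBS (pvLineStarts cs) idx 0 ((pvLineStarts cs).length - 1)
      = (cs.take idx.toNat).count '\n' := by
  rw [pvLineStarts_eq]
  have hnle : (cs.take idx.toNat).count '\n' ≤ (pvF 0 cs).length := by
    rw [pvF_length cs 0]; exact count_take_le cs idx.toNat
  apply pvBS_eq
  · intro k hk
    cases k with
    | zero =>
      simp only [List.getD_cons_zero]
      exact ⟨fun _ => Nat.zero_le _, fun _ => h0⟩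
    | succ k' =>
      simp only [List.getD_cons_succ, List.length_cons] at hk ⊢
      have h := pvF_getD cs 0 k' idx.toNat (by omega)
      rw [Int.toNat_of_nonneg h0, zero_add] at h
      rw [h]
      omega
  · rfl
  · exact Nat.zero_le _
  · simpa using hnle
  · simp only [List.length_cons]; omega

lemma findFrom_past (cs os : List Char) :
    PySem.Chars.findFrom cs os ((cs.length : Int) + 1) none = -1 := by
  simp only [PySem.Chars.findFrom]
  split
  · next h => exact absurd h (by omega)
  · next h => rw [if_pos (by omega)]

lemma pvLtInf_elim (d : Int) (bd : Option Int) :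
    pvLtInf d bd = bd.elim true (fun b => decide (d < b)) := by
  cases bd <;> rfl

-- both find-loops agree, for any fuel, from any state with 0 ≤ start ≤ len + 1
lemma loop_eq (cs os : List Char) (nl : Int) : ∀ (fuel : Nat) (start bi : Int) (bd : Option Int),
    0 ≤ start → start ≤ (cs.length : Int) + 1 →
    pvLoopA cs os nl (pvLineStarts cs) fuel start bi bd = pvLoopB cs os nl fuel start bi bd := by
  intro fuel
  induction fuel with
  | zero => intro start bi bd _ _; rfl
  | succ f ih =>
    intro start bi bd hs0 hs1
    simp only [pvLoopA, pvLoopB]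
    by_cases hend : start = (cs.length : Int) + 1
    · rw [hend, findFrom_past, if_pos rfl, if_pos rfl]
    · have hsn : start = ((start.toNat : Nat) : Int) := (Int.toNat_of_nonneg hs0).symm
      have hsl : start.toNat ≤ cs.length := by omega
      rw [hsn, PySem.Chars.findFrom_natCast cs os start.toNat hsl]
      by_cases hf : PySem.Chars.find (List.drop start.toNat cs) os = -1
      · rw [if_pos hf]
        rfl
      · rw [if_neg hf]
        have hfind0 : 0 ≤ PySem.Chars.find (List.drop start.toNat cs) os := by
          have := PySem.Chars.neg_one_le_find (List.drop start.toNat cs) os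
          omega
        have hfindlen : PySem.Chars.find (List.drop start.toNat cs) os
            ≤ ((List.drop start.toNat cs).length : Int) :=
          PySem.Chars.find_le_length _ _
        set idx : Int := (start.toNat : Int) + PySem.Chars.find (List.drop start.toNat cs) os
          with hidx
        have hidx0 : 0 ≤ idx := by omega
        have hidxlen : idx ≤ (cs.length : Int) := by
          simp only [List.length_drop] at hfindlen
          omega
        have hne : ¬ (idx = -1) := by omega
        rw [if_neg hne, if_neg hne]
        have hline : (pvBS (pvLineStarts cs) idx 0 ((pvLineStarts cs).length - 1) : Int) + 1
            = (((cs.take idx.toNat).count '\n' : Nat) : Int) + 1 := by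
          rw [line_eq cs idx hidx0]
        rw [hline, pvLtInf_elim]
        by_cases hb : (Option.elim bd true
            fun b => decide (|(((cs.take idx.toNat).count '\n' : Nat) : Int) + 1 - nl| < b)) = true
        · rw [if_pos hb, if_pos hb]
          exact ih (idx + 1) idx _ (by omega) (by omega)
        · rw [if_neg hb, if_neg hb]
          exact ih (idx + 1) bi bd (by omega) (by omega)

-- ===== VERDICT (by name: the statement is the Claim_ definition above) =====
theorem pick_nearest_py_spec : Claim_equal_pick_nearest_py := by
  intro content old_string near_line _
  unfold Spec_pick_nearest_py pick_nearest_py pick_nearest_py_alt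
  exact loop_eq content.toList old_string.toList near_line _ 0 (-1) none (by omega)
    (by have := Int.natCast_nonneg content.toList.length; omega)
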